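-- pv_equiv track=rewrite | github.com/windseeker5/minipass_env | MinipassWebSite/utils/deploy_helpers.py | update_docker_compose_org_name
-- ===== SOURCE A (Python) =====
-- def update_docker_compose_org_name(compose_content, organization_name):
--     """
--     Updates the docker-compose content to include the organization name.
--
--     Args:
--         compose_content (str): The docker-compose content
--         organization_name (str): Organization name
--
--     Returns:
--         str: Updated docker-compose content
--     """
--     if organization_name and organization_name.strip():
--         # Update the ORG_NAME environment variable
--         lines = compose_content.split('\n')
--         for i, line in enumerate(lines):
--             if 'ORG_NAME=' in line:
--                 lines[i] = f"          - ORG_NAME={organization_name.strip()}"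
--                 break
--         return '\n'.join(lines)
--     return compose_content
-- ===== SOURCE B (Python) =====
-- def update_docker_compose_org_name(compose_content, organization_name):
--     """Same behaviour as A, but by direct string surgery: locate the first
--     occurrence of 'ORG_NAME=' with str.find, cut the enclosing line out via
--     its '\n' boundaries (rfind/find) and splice in the replacement line."""
--     if organization_name and organization_name.strip():
--         i = compose_content.find('ORG_NAME=')
--         if i == -1:
--             return compose_content
--         start = compose_content.rfind('\n', 0, i) + 1
--         end = compose_content.find('\n', i)
--         if end == -1:
--             end = len(compose_content)
--         return (compose_content[:start]
--                 + f"          - ORG_NAME={organization_name.strip()}"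
--                 + compose_content[end:])
--     return compose_content
-- ===== Notes on version B (the rewrite author's own statement) =====
-- stated objective: simpler
-- what changed: A splits the content into a list of lines, scans them with an indexed for-loop to rewrite the first line containing 'ORG_NAME=', and joins the list back; B never builds a line list: it locates the first occurrence with one str.find, finds the enclosing line's boundaries with rfind/find on '\n', and splices the replacement line in with two slices.
import Mathlib
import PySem

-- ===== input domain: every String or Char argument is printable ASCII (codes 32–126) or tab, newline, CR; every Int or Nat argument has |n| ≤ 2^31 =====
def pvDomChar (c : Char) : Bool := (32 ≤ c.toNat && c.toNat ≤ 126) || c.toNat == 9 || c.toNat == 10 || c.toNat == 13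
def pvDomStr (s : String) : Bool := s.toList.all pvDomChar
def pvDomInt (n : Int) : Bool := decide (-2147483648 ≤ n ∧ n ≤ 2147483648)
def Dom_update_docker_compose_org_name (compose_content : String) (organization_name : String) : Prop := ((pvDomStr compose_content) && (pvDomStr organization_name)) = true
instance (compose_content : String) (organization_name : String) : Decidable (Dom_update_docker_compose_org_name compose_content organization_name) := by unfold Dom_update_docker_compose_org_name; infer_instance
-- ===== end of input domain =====

-- B replaces A's split-into-lines / indexed scan / join by direct string surgery: one
-- substring search for 'ORG_NAME=', the enclosing line's '\n' boundaries via rfind/find,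
-- and a single splice (objective: simpler, one pass of C-level searches instead of a
-- Python-level loop over a list of lines).

-- ===== PORT A =====
-- the for/enumerate loop with break: replace the first line containing 'ORG_NAME='
def updateLoopA (newLine : List Char) : List (List Char) → List (List Char)
  | [] => []
  | l :: rest =>
    if PySem.Chars.isIn "ORG_NAME=".toList l then newLine :: rest
    else l :: updateLoopA newLine rest

def update_docker_compose_org_name (compose_content : String) (organization_name : String) : String :=
  if organization_name.toList ≠ [] ∧ PySem.Chars.strip organization_name.toList ≠ [] then
    -- lines = compose_content.split('\n'); for-loop with break; '\n'.join(lines)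
    String.ofList (PySem.Chars.join ['\n']
      (updateLoopA ("          - ORG_NAME=".toList ++ PySem.Chars.strip organization_name.toList)
        (PySem.Chars.splitOn compose_content.toList ['\n'])))
  else compose_content

-- ===== PORT B =====
def update_docker_compose_org_name_alt (compose_content : String) (organization_name : String) : String :=
  if organization_name.toList ≠ [] ∧ PySem.Chars.strip organization_name.toList ≠ [] then
    let s := compose_content.toList
    let i := PySem.Chars.find s "ORG_NAME=".toList          -- compose_content.find('ORG_NAME=')
    if i = -1 then compose_content
    else
      let start := PySem.Chars.rfindFrom s ['\n'] 0 (some i) + 1   -- compose_content.rfind('\n', 0, i) + 1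
      let stop0 := PySem.Chars.findFrom s ['\n'] i none            -- compose_content.find('\n', i)
      let stop := if stop0 = -1 then (s.length : Int) else stop0
      String.ofList (PySem.List.slice s none (some start)
        ++ ("          - ORG_NAME=".toList ++ PySem.Chars.strip organization_name.toList)
        ++ PySem.List.slice s (some stop) none)
  else compose_content

-- ===== PRECONDITION & SPEC =====
def Spec_update_docker_compose_org_name (compose_content : String) (organization_name : String) (out : String) : Prop := out = update_docker_compose_org_name_alt compose_content organization_name
instance (compose_content : String) (organization_name : String) (out : String) : Decidable (Spec_update_docker_compose_org_name compose_content organization_name out) := by unfold Spec_update_docker_compose_org_name; infer_instance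

-- ===== CLAIM (what is proved, stated in full; the proofs are below) =====
def Claim_equal_update_docker_compose_org_name : Prop := ∀ (compose_content : String) (organization_name : String), Dom_update_docker_compose_org_name compose_content organization_name → Spec_update_docker_compose_org_name compose_content organization_name (update_docker_compose_org_name compose_content organization_name)

-- ===== LEMMAS AND PROOFS =====


def pvConsHd (p : List Char) : List (List Char) → List (List Char)
  | [] => [p]
  | x :: xs => (p ++ x) :: xs
def pvSplit : List Char → List (List Char)
  | [] => [[]]
  | c :: t => if c = '\n' then [] :: pvSplit t else pvConsHd [c] (pvSplit t)
theorem pvConsHd_assoc (a b : List Char) (v : List (List Char)) :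
    pvConsHd a (pvConsHd b v) = pvConsHd (a ++ b) v := by
  cases v <;> simp [pvConsHd]
theorem pvSplit_ne_nil (l : List Char) : pvSplit l ≠ [] := by
  cases l with
  | nil => simp [pvSplit]
  | cons c t =>
    simp only [pvSplit]; split
    · simp
    · cases h : pvSplit t <;> simp [pvConsHd]
theorem pvConsHd_nil (v : List (List Char)) (h : v ≠ []) : pvConsHd [] v = v := by
  cases v with
  | nil => exact absurd rfl h
  | cons x xs => simp [pvConsHd]

theorem pvGoSpec (fuel : Nat) (l cur : List Char) (acc : List (List Char)) (h : l.length ≤ fuel) :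
    PySem.Chars.splitOn.go ['\n'] fuel l cur acc = acc.reverse ++ pvConsHd cur.reverse (pvSplit l) := by
  induction fuel generalizing l cur acc with
  | zero =>
    have : l = [] := List.length_eq_zero_iff.mp (Nat.le_zero.mp h)
    subst this
    rw [PySem.Chars.splitOn.go]
    simp [pvSplit, pvConsHd]
  | succ f ih =>
    cases l with
    | nil =>
      rw [PySem.Chars.splitOn.go]
      · simp [pvSplit, pvConsHd]
      · omega
    | cons c rest =>
      rw [PySem.Chars.splitOn.go]
      simp only [List.length_cons, Nat.add_le_add_iff_right] at h
      by_cases hc : c = '\n'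
      · subst hc
        rw [if_pos (by simp)]
        simp only [List.length_singleton, List.drop_one, List.tail_cons]
        rw [ih _ _ _ h]
        simp only [List.reverse_cons, List.reverse_nil]
        rw [pvConsHd_nil _ (pvSplit_ne_nil rest)]
        show acc.reverse ++ [cur.reverse] ++ pvSplit rest = acc.reverse ++ pvConsHd cur.reverse (pvSplit ('\n' :: rest))
        simp [pvSplit, pvConsHd]
      · rw [if_neg (by simp [List.cons_prefix_cons]; intro hh; exact absurd hh.symm hc)]
        rw [ih _ _ _ h]
        show acc.reverse ++ pvConsHd (c :: cur).reverse (pvSplit rest) = acc.reverse ++ pvConsHd cur.reverse (pvSplit (c :: rest))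
        rw [show pvSplit (c :: rest) = pvConsHd [c] (pvSplit rest) from by simp [pvSplit, hc]]
        rw [pvConsHd_assoc]
        simp

theorem pvSplitOn_eq (cs : List Char) : PySem.Chars.splitOn cs ['\n'] = pvSplit cs := by
  show PySem.Chars.splitOn.go ['\n'] (cs.length + 1) cs [] [] = pvSplit cs
  rw [pvGoSpec _ _ _ _ (by omega)]
  simp [pvConsHd_nil _ (pvSplit_ne_nil cs)]

theorem pvJoin_consHd (sep p x : List Char) (xs : List (List Char)) :
    PySem.Chars.join sep (pvConsHd p (x :: xs)) = p ++ PySem.Chars.join sep (x :: xs) := by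
  cases xs with
  | nil => simp [pvConsHd, PySem.Chars.join_singleton]
  | cons y ys => simp [pvConsHd, PySem.Chars.join_cons_cons]

theorem pvJoin_pvSplit (cs : List Char) : PySem.Chars.join ['\n'] (pvSplit cs) = cs := by
  induction cs with
  | nil => simp [pvSplit, PySem.Chars.join_singleton]
  | cons c t ih =>
    by_cases hc : c = '\n'
    · subst hc
      rw [show pvSplit ('\n' :: t) = [] :: pvSplit t from by simp [pvSplit]]
      obtain ⟨x, xs, hx⟩ : ∃ x xs, pvSplit t = x :: xs := by
        cases h : pvSplit t with
        | nil => exact absurd h (pvSplit_ne_nil t)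
        | cons x xs => exact ⟨x, xs, rfl⟩
      rw [hx, PySem.Chars.join_cons_cons]
      rw [hx] at ih
      simp [ih]
    · simp only [pvSplit, if_neg hc]
      obtain ⟨x, xs, hx⟩ : ∃ x xs, pvSplit t = x :: xs := by
        cases h : pvSplit t with
        | nil => exact absurd h (pvSplit_ne_nil t)
        | cons x xs => exact ⟨x, xs, rfl⟩
      rw [hx, pvJoin_consHd]
      rw [hx] at ih
      simp [ih]

def pvPat : List Char := "ORG_NAME=".toList

theorem pvPrefix_left {p a b : List Char} (h : p <+: a ++ b) (hl : p.length ≤ a.length) : p <+: a := by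
  obtain ⟨r, hr⟩ := h
  rw [List.prefix_iff_eq_take]
  calc p = List.take p.length (p ++ r) := (List.take_left ..).symm
    _ = List.take p.length (a ++ b) := by rw [hr]
    _ = List.take p.length a := List.take_append_of_le_length hl

theorem pvSingleton_prefix {a : Char} {v : List Char} : [a] <+: v ↔ v.head? = some a := by
  cases v with
  | nil => simp
  | cons x t => simp [List.cons_prefix_cons, eq_comm]

-- occurrence of ['\n'] at k  ↔  v[k]? = '\n'
theorem pvNlOcc {v : List Char} {k : Nat} : ['\n'] <+: v.drop k ↔ v[k]? = some '\n' := by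
  rw [pvSingleton_prefix, List.head?_drop]

theorem pvPat_len : pvPat.length = 9 := by decide
theorem pvNl_not_mem_pat : '\n' ∉ pvPat := by decide

-- splitting an occurrence of pvPat across  line ++ '\n' :: t
theorem pvOccSplit {line t : List Char} (_hline : '\n' ∉ line) {k : Nat}
    (h : pvPat <+: (line ++ '\n' :: t).drop k) :
    (k + pvPat.length ≤ line.length ∧ pvPat <+: line.drop k) ∨
    (line.length + 1 ≤ k ∧ pvPat <+: t.drop (k - (line.length + 1))) := by
  rcases le_or_gt (k + pvPat.length) line.length with hk | hk
  · left
    refine ⟨hk, ?_⟩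
    rw [List.drop_append_of_le_length (by omega)] at h
    exact pvPrefix_left h (by simp; omega)
  · rcases le_or_gt (line.length + 1) k with hk2 | hk2
    · right
      refine ⟨hk2, ?_⟩
      have : (line ++ '\n' :: t).drop k = t.drop (k - (line.length + 1)) := by
        rw [List.drop_append, List.drop_eq_nil_of_le (by omega)]
        have h4 : k - line.length = (k - (line.length + 1)) + 1 := by omega
        rw [h4]
        simp
      rwa [this] at h
    · -- k ≤ line.length < k + pat.length : the occurrence would contain '\n'
      exfalso
      have hkle : k ≤ line.length := by omega
      rw [List.drop_append_of_le_length hkle] at h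
      have hp : pvPat = List.take pvPat.length (line.drop k ++ '\n' :: t) :=
        List.prefix_iff_eq_take.mp h
      have hlen : (line.drop k).length < pvPat.length := by simp; omega
      have hmem : '\n' ∈ pvPat := by
        rw [hp]
        have hsplit : pvPat.length = (line.drop k).length + (pvPat.length - (line.drop k).length) := by omega
        rw [hsplit, List.take_append]
        have : 0 < pvPat.length - (line.drop k).length := by omega
        cases hq : pvPat.length - (line.drop k).length with
        | zero => omega
        | succ m => simp
      exact pvNl_not_mem_pat hmem

-- converse: occurrence inside line
theorem pvOccLeft {line t : List Char} {k : Nat} (h : pvPat <+: line.drop k) :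
    pvPat <+: (line ++ '\n' :: t).drop k := by
  have hk : k ≤ line.length := by
    by_contra hc
    rw [List.drop_eq_nil_of_le (by omega)] at h
    have := h.length_le
    simp [pvPat_len] at this
  rw [List.drop_append_of_le_length hk]
  exact h.trans (List.prefix_append _ _)

-- converse: occurrence inside t
theorem pvOccRight {line t : List Char} {m : Nat} (h : pvPat <+: t.drop m) :
    pvPat <+: (line ++ '\n' :: t).drop (line.length + 1 + m) := by
  rw [List.drop_append, List.drop_eq_nil_of_le (by omega)]
  have h4 : line.length + 1 + m - line.length = m + 1 := by omega
  rw [h4]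
  simpa using h

-- find s sub = j, given first occurrence at j
theorem pvFind_eq {s sub : List Char} {j : Nat} (h1 : sub <+: s.drop j)
    (h2 : ∀ k < j, ¬ sub <+: s.drop k) : PySem.Chars.find s sub = (j : Int) := by
  have hin : PySem.Chars.isIn sub s = true :=
    (PySem.Chars.exists_prefix_drop_iff_isIn sub s).mp ⟨j, h1⟩
  have hnn : 0 ≤ PySem.Chars.find s sub :=
    (PySem.Chars.find_nonneg_iff s sub).mpr ((PySem.Chars.isIn_iff_infix sub s).mp hin)
  obtain ⟨hp, hmin⟩ := PySem.Chars.find_spec hnn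
  rcases Nat.lt_trichotomy (PySem.Chars.find s sub).toNat j with hlt | heq | hgt
  · exact absurd hp (h2 _ hlt)
  · omega
  · exact absurd h1 (hmin j hgt)

-- rfind.go: all positions ≤ fuel fail
theorem pvRfindGo_neg {s sub : List Char} {fuel : Nat}
    (h : ∀ k ≤ fuel, ¬ sub <+: s.drop k) : PySem.Chars.rfind.go s sub fuel = -1 := by
  induction fuel with
  | zero =>
    rw [PySem.Chars.rfind.go]
    rw [if_neg]
    simp only [List.isPrefixOf_iff_prefix]
    simpa using h 0 (by omega)
  | succ f ih =>
    rw [PySem.Chars.rfind.go]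
    rw [if_neg]
    · exact ih fun k hk => h k (by omega)
    · simp only [List.isPrefixOf_iff_prefix]
      simpa using h (f + 1) (by omega)

-- rfind.go: j ≤ fuel works and everything in (j, fuel] fails
theorem pvRfindGo_pos {s sub : List Char} {fuel j : Nat} (hj : j ≤ fuel)
    (h1 : sub <+: s.drop j) (h2 : ∀ k, j < k → k ≤ fuel → ¬ sub <+: s.drop k) :
    PySem.Chars.rfind.go s sub fuel = (j : Int) := by
  induction fuel with
  | zero =>
    have : j = 0 := by omega
    subst this
    rw [PySem.Chars.rfind.go]
    rw [if_pos (show sub.isPrefixOf s = true by simpa [List.isPrefixOf_iff_prefix] using h1)]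
    simp
  | succ f ih =>
    rw [PySem.Chars.rfind.go]
    by_cases hc : j = f + 1
    · subst hc
      rw [if_pos (show sub.isPrefixOf (List.drop (f+1) s) = true by
        simpa [List.isPrefixOf_iff_prefix] using h1)]
    · rw [if_neg]
      · exact ih (by omega) fun k hk hk2 => h2 k hk (by omega)
      · simp only [List.isPrefixOf_iff_prefix]
        simpa using h2 (f + 1) (by omega) (by omega)

theorem pvRfind_neg {s sub : List Char} (h : ∀ k, ¬ sub <+: s.drop k) :
    PySem.Chars.rfind s sub = -1 :=
  pvRfindGo_neg fun k _ => h k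

theorem pvRfind_eq {s sub : List Char} {j : Nat} (hs : sub ≠ []) (h1 : sub <+: s.drop j)
    (h2 : ∀ k, j < k → ¬ sub <+: s.drop k) : PySem.Chars.rfind s sub = (j : Int) := by
  have hj : j ≤ s.length := by
    by_contra hc
    rw [List.drop_eq_nil_of_le (by omega)] at h1
    exact hs (List.prefix_nil.mp h1)
  exact pvRfindGo_pos hj h1 fun k hk _ => h2 k hk

-- either no '\n' at all, or a last occurrence
theorem pvRfind_cases (u : List Char) :
    (∀ k, ¬ ['\n'] <+: u.drop k) ∨
    ∃ j : Nat, (['\n'] <+: u.drop j) ∧ ∀ k, j < k → ¬ ['\n'] <+: u.drop k := by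
  by_cases h : ∃ k : Nat, ['\n'] <+: u.drop k
  · right
    obtain ⟨k0, hk0⟩ := h
    have hk0le : k0 ≤ u.length := by
      by_contra hc
      rw [List.drop_eq_nil_of_le (by omega)] at hk0
      simpa using hk0.length_le
    refine ⟨Nat.findGreatest (fun k => ['\n'] <+: u.drop k) u.length,
      Nat.findGreatest_spec (P := fun k => ['\n'] <+: u.drop k) hk0le hk0, ?_⟩
    intro k hk
    by_cases hku : k ≤ u.length
    · exact Nat.findGreatest_is_greatest (P := fun k => ['\n'] <+: u.drop k) hk hku
    · intro hc
      rw [List.drop_eq_nil_of_le (by omega)] at hc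
      simpa using hc.length_le
  · left
    simpa using h

theorem pvRfind_not_mem {u : List Char} (h : '\n' ∉ u) : PySem.Chars.rfind u ['\n'] = -1 := by
  apply pvRfind_neg
  intro k hc
  rw [pvNlOcc] at hc
  exact h (List.mem_of_getElem? hc)

-- the shift law for rfind over  line ++ '\n' :: u   ('\n' ∉ line)
theorem pvRfind_shift {line u : List Char} (_hline : '\n' ∉ line) :
    PySem.Chars.rfind (line ++ '\n' :: u) ['\n'] = (line.length : Int) + 1 + PySem.Chars.rfind u ['\n'] := by
  rcases pvRfind_cases u with hno | ⟨j, hj1, hj2⟩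
  · rw [pvRfind_neg (s := u) (fun k => hno k)]
    have : PySem.Chars.rfind (line ++ '\n' :: u) ['\n'] = (line.length : Int) := by
      apply pvRfind_eq (by simp)
      · rw [List.drop_left]
        simp
      · intro k hk hc
        rw [pvNlOcc] at hc
        rw [List.getElem?_append_right (by omega)] at hc
        have hk2 : k - line.length = (k - line.length - 1) + 1 := by omega
        rw [hk2] at hc
        simp only [List.getElem?_cons_succ] at hc
        exact hno _ (pvNlOcc.mpr hc)
    rw [this]; ring
  · have hru : PySem.Chars.rfind u ['\n'] = (j : Int) := pvRfind_eq (by simp) hj1 hj2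
    rw [hru]
    have : PySem.Chars.rfind (line ++ '\n' :: u) ['\n'] = ((line.length + 1 + j : Nat) : Int) := by
      apply pvRfind_eq (by simp)
      · rw [pvNlOcc] at hj1 ⊢
        rw [List.getElem?_append_right (by omega)]
        have : line.length + 1 + j - line.length = j + 1 := by omega
        rw [this]
        simpa using hj1
      · intro k hk hc
        rw [pvNlOcc] at hc
        rw [List.getElem?_append_right (by omega)] at hc
        have hk2 : k - line.length = (k - line.length - 1) + 1 := by omega
        rw [hk2] at hc
        simp only [List.getElem?_cons_succ] at hc
        exact hj2 _ (by omega) (pvNlOcc.mpr hc)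
    rw [this]
    push_cast
    ring

theorem pvRfindFrom_zero (s : List Char) (k : Nat) (hk : k ≤ s.length) :
    PySem.Chars.rfindFrom s ['\n'] 0 (some (k : Int)) = PySem.Chars.rfind (s.take k) ['\n'] := by
  simp only [PySem.Chars.rfindFrom]
  split_ifs with h1 h2 h3 h4 <;> try (exfalso; omega)
  all_goals (simp only [Int.toNat_zero, List.drop_zero, Int.toNat_natCast] at *; omega)

def pvBcore (newLine : List Char) (s : List Char) : List Char :=
  let i := PySem.Chars.find s pvPat
  if i = -1 then s
  else
    let start := PySem.Chars.rfindFrom s ['\n'] 0 (some i) + 1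
    let stop0 := PySem.Chars.findFrom s ['\n'] i none
    let stop := if stop0 = -1 then (s.length : Int) else stop0
    PySem.List.slice s none (some start) ++ newLine ++ PySem.List.slice s (some stop) none

theorem pvNoOcc_iff {cs : List Char} : (∀ k, ¬ pvPat <+: cs.drop k) ↔ PySem.Chars.find cs pvPat = -1 := by
  rw [PySem.Chars.find_eq_neg_one_iff]
  rw [← PySem.Chars.isIn_iff_infix, ← PySem.Chars.exists_prefix_drop_iff_isIn]
  simp

theorem pvBcore_noMatch {cs : List Char} (new : List Char)
    (hno : ∀ k, ¬ pvPat <+: cs.drop k) : pvBcore new cs = cs := by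
  simp only [pvBcore]
  simp [pvNoOcc_iff.mp hno]

theorem pvIsIn_iff_occ {l : List Char} : PySem.Chars.isIn pvPat l = true ↔ ∃ k, pvPat <+: l.drop k := by
  exact (PySem.Chars.exists_prefix_drop_iff_isIn pvPat l).symm

-- B's core when the FIRST line contains the pattern: the whole first line is replaced
theorem pvBcore_lineMatch {line rest : List Char} (new : List Char) (hnl : '\n' ∉ line)
    (hm : PySem.Chars.isIn pvPat line = true)
    (hrest : rest = [] ∨ ∃ t, rest = '\n' :: t) :
    pvBcore new (line ++ rest) = new ++ rest := by
  obtain ⟨j, hj⟩ := pvIsIn_iff_occ.mp hm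
  have hnn : 0 ≤ PySem.Chars.find line pvPat := by
    rw [PySem.Chars.find_nonneg_iff, ← PySem.Chars.isIn_iff_infix]; exact hm
  obtain ⟨hp, hmin⟩ := PySem.Chars.find_spec hnn
  set iN : Nat := (PySem.Chars.find line pvPat).toNat with hiN
  have hlen9 : pvPat.length ≤ line.length - iN := by simpa using hp.length_le
  rw [pvPat_len] at hlen9
  have hiNle : iN + 9 ≤ line.length := by omega
  -- find over the whole string = iN
  have hfind : PySem.Chars.find (line ++ rest) pvPat = (iN : Int) := by
    apply pvFind_eq
    · rcases hrest with h | ⟨t, h⟩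
      · subst h; simpa using hp
      · subst h; exact pvOccLeft hp
    · intro k hk hc
      rcases hrest with h | ⟨t, h⟩
      · subst h; simp at hc; exact hmin k hk hc
      · subst h
        rcases pvOccSplit hnl hc with ⟨_, hL⟩ | ⟨hR, _⟩
        · exact hmin k hk hL
        · omega
  simp only [pvBcore, hfind]
  rw [if_neg (by omega)]
  -- start = 0 : no '\n' before the occurrence
  have hstart : PySem.Chars.rfindFrom (line ++ rest) ['\n'] 0 (some (iN : Int)) = -1 := by
    rw [pvRfindFrom_zero _ iN (by simp; omega)]
    apply pvRfind_not_mem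
    intro hmem
    have : (line ++ rest).take iN = line.take iN := List.take_append_of_le_length (by omega)
    rw [this] at hmem
    exact hnl (List.mem_of_mem_take hmem)
  rw [hstart]
  have hdrop : (line ++ rest).drop iN = line.drop iN ++ rest :=
    List.drop_append_of_le_length (by omega)
  rcases hrest with h | ⟨t, h⟩
  · subst h
    have hnofind : PySem.Chars.find ((line ++ ([] : List Char)).drop iN) ['\n'] = -1 := by
      apply (PySem.Chars.find_eq_neg_one_iff _ _).mpr
      intro hinf
      rw [← PySem.Chars.isIn_iff_infix, ← PySem.Chars.exists_prefix_drop_iff_isIn] at hinf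
      obtain ⟨k, hk⟩ := hinf
      rw [pvNlOcc] at hk
      simp only [List.append_nil] at hk
      exact hnl (List.mem_of_mem_drop (List.mem_of_getElem? hk))
    have hstop : PySem.Chars.findFrom (line ++ ([] : List Char)) ['\n'] (iN : Int) none = -1 := by
      rw [PySem.Chars.findFrom_natCast _ _ iN (by simp; omega), hnofind]
      simp
    rw [hstop, if_pos rfl]
    rw [PySem.List.slice_to _ (by omega), PySem.List.slice_from _ (by simp)]
    simp
  · subst h
    have hfindnl : PySem.Chars.find ((line ++ '\n' :: t).drop iN) ['\n'] = ((line.length - iN : Nat) : Int) := by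
      rw [hdrop]
      apply pvFind_eq
      · rw [pvNlOcc, List.getElem?_append_right (by simp)]
        simp
      · intro k hk hc
        rw [pvNlOcc] at hc
        rw [List.getElem?_append_left (by simp; omega)] at hc
        exact hnl (List.mem_of_mem_drop (List.mem_of_getElem? hc))
    have hstop : PySem.Chars.findFrom (line ++ '\n' :: t) ['\n'] (iN : Int) none = (line.length : Int) := by
      rw [PySem.Chars.findFrom_natCast _ _ iN (by simp; omega), hfindnl]
      rw [if_neg (by omega)]
      omega
    rw [hstop]
    rw [if_neg (by omega)]
    rw [PySem.List.slice_to _ (by omega), PySem.List.slice_from _ (by omega)]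
    have h1 : ((-1 : Int) + 1).toNat = 0 := by decide
    rw [h1]
    have h2 : ((line.length : Int)).toNat = line.length := by omega
    rw [h2, List.drop_left]
    simp

-- B's core skips a clean first line:  pvBcore (line ++ '\n' :: t) = line ++ '\n' :: pvBcore t
theorem pvBcore_shift {line t : List Char} (new : List Char) (hnl : '\n' ∉ line)
    (hnm : PySem.Chars.isIn pvPat line = false)
    (hocc : ∃ m, pvPat <+: t.drop m) :
    pvBcore new (line ++ '\n' :: t) = line ++ '\n' :: pvBcore new t := by
  have hnn : 0 ≤ PySem.Chars.find t pvPat := by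
    rw [PySem.Chars.find_nonneg_iff, ← PySem.Chars.isIn_iff_infix]
    exact pvIsIn_iff_occ.mpr hocc
  obtain ⟨hp, hmin⟩ := PySem.Chars.find_spec hnn
  obtain ⟨mN, hfind_t⟩ : ∃ mN : Nat, PySem.Chars.find t pvPat = (mN : Int) :=
    ⟨(PySem.Chars.find t pvPat).toNat, by omega⟩
  rw [hfind_t] at hp hmin
  simp only [Int.toNat_natCast] at hp hmin
  have hlen9 : pvPat.length ≤ t.length - mN := by simpa using hp.length_le
  rw [pvPat_len] at hlen9
  have hmle : mN + 9 ≤ t.length := by omega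
  -- find over the whole string = line.length + 1 + mN
  have hfind : PySem.Chars.find (line ++ '\n' :: t) pvPat = ((line.length + 1 + mN : Nat) : Int) := by
    apply pvFind_eq
    · exact pvOccRight hp
    · intro k hk hc
      rcases pvOccSplit hnl hc with ⟨_, hLo⟩ | ⟨hR, hRo⟩
      · exact (by simpa [hnm] using pvIsIn_iff_occ.mpr ⟨k, hLo⟩ : False)
      · exact hmin _ (by omega) hRo
  simp only [pvBcore, hfind, hfind_t]
  rw [if_neg (show ¬ ((line.length + 1 + mN : Nat) : Int) = -1 from by omega),
      if_neg (show ¬ ((mN : Nat) : Int) = -1 from by omega)]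
  -- take/drop decompositions
  have htake : (line ++ '\n' :: t).take (line.length + 1 + mN) = line ++ '\n' :: t.take mN := by
    rw [List.take_append, List.take_of_length_le (by omega)]
    rw [show line.length + 1 + mN - line.length = mN + 1 from by omega]
    simp
  have hdrop : (line ++ '\n' :: t).drop (line.length + 1 + mN) = t.drop mN := by
    rw [List.drop_append, List.drop_eq_nil_of_le (by omega)]
    rw [show line.length + 1 + mN - line.length = mN + 1 from by omega]
    simp
  -- start and stop both live at offset line.length + 1
  have hstart : PySem.Chars.rfindFrom (line ++ '\n' :: t) ['\n'] 0 (some ((line.length + 1 + mN : Nat) : Int))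
      = (line.length : Int) + 1 + PySem.Chars.rfind (t.take mN) ['\n'] := by
    rw [pvRfindFrom_zero _ _ (by simp; omega), htake, pvRfind_shift hnl]
  have hstart_t : PySem.Chars.rfindFrom t ['\n'] 0 (some ((mN : Nat) : Int))
      = PySem.Chars.rfind (t.take mN) ['\n'] := pvRfindFrom_zero _ _ (by omega)
  have hstop : PySem.Chars.findFrom (line ++ '\n' :: t) ['\n'] ((line.length + 1 + mN : Nat) : Int) none
      = if PySem.Chars.find (t.drop mN) ['\n'] = -1 then -1
        else ((line.length + 1 + mN : Nat) : Int) + PySem.Chars.find (t.drop mN) ['\n'] := by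
    rw [PySem.Chars.findFrom_natCast _ _ (line.length + 1 + mN) (by simp; omega), hdrop]
  have hstop_t : PySem.Chars.findFrom t ['\n'] ((mN : Nat) : Int) none
      = if PySem.Chars.find (t.drop mN) ['\n'] = -1 then -1
        else ((mN : Nat) : Int) + PySem.Chars.find (t.drop mN) ['\n'] := by
    rw [PySem.Chars.findFrom_natCast _ _ mN (by omega)]
  rw [hstart, hstart_t, hstop, hstop_t]
  have hfge : PySem.Chars.find (t.drop mN) ['\n'] = -1 ∨ 0 ≤ PySem.Chars.find (t.drop mN) ['\n'] := by
    have := PySem.Chars.neg_one_le_find (t.drop mN) ['\n']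
    omega
  rcases pvRfind_cases (t.take mN) with hno | ⟨rj, hrj1, hrj2⟩
  · rw [pvRfind_neg hno]
    rcases hfge with hfnl | hfpos
    · rw [if_pos hfnl, if_pos hfnl, if_pos (rfl : (-1 : Int) = -1), if_pos (rfl : (-1 : Int) = -1)]
      rw [PySem.List.slice_to _ (by omega), PySem.List.slice_to _ (by omega)]
      rw [PySem.List.slice_from _ (by omega), PySem.List.slice_from _ (by omega)]
      rw [show ((line.length : Int) + 1 + -1 + 1).toNat = line.length + 1 from by omega,
          show ((-1:Int) + 1).toNat = 0 from by decide]
      rw [show (((line ++ '\n' :: t).length : Int)).toNat = (line ++ '\n' :: t).length from by omega,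
          show (((t.length : Nat) : Int)).toNat = t.length from by omega]
      rw [List.drop_length, List.drop_length]
      rw [List.take_append, List.take_of_length_le (by omega)]
      rw [show line.length + 1 - line.length = 1 from by omega]
      simp
    · have hfnl : ¬ PySem.Chars.find (t.drop mN) ['\n'] = -1 := by omega
      rw [if_neg hfnl, if_neg hfnl]
      rw [if_neg (by omega), if_neg (by omega)]
      rw [PySem.List.slice_to _ (by omega), PySem.List.slice_to _ (by omega)]
      rw [PySem.List.slice_from _ (by omega), PySem.List.slice_from _ (by omega)]
      rw [show ((line.length : Int) + 1 + -1 + 1).toNat = line.length + 1 from by omega,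
          show ((-1:Int) + 1).toNat = 0 from by decide]
      rw [show (((line.length + 1 + mN : Nat) : Int) + PySem.Chars.find (t.drop mN) ['\n']).toNat
            = line.length + 1 + (((mN : Nat) : Int) + PySem.Chars.find (t.drop mN) ['\n']).toNat from by omega]
      rw [List.take_append, List.take_of_length_le (by omega)]
      rw [show line.length + 1 - line.length = 1 from by omega]
      rw [List.drop_append, List.drop_eq_nil_of_le (by omega)]
      rw [show line.length + 1 + (((mN : Nat) : Int) + PySem.Chars.find (t.drop mN) ['\n']).toNat - line.length
            = (((mN : Nat) : Int) + PySem.Chars.find (t.drop mN) ['\n']).toNat + 1 from by omega]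
      simp
  · rw [pvRfind_eq (by simp) hrj1 hrj2]
    have hrjlen : rj < mN := by
      have h1 := hrj1.length_le
      have h2 : rj ≤ (t.take mN).length := by
        by_contra hcc
        rw [List.drop_eq_nil_of_le (by omega)] at hrj1
        simpa using hrj1.length_le
      simp at h1 h2
      omega
    rcases hfge with hfnl | hfpos
    · rw [if_pos hfnl, if_pos hfnl, if_pos (rfl : (-1 : Int) = -1), if_pos (rfl : (-1 : Int) = -1)]
      rw [PySem.List.slice_to _ (by omega), PySem.List.slice_to _ (by omega)]
      rw [PySem.List.slice_from _ (by omega), PySem.List.slice_from _ (by omega)]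
      rw [show ((line.length : Int) + 1 + (rj : Int) + 1).toNat = line.length + 1 + (rj + 1) from by omega,
          show (((rj : Nat) : Int) + 1).toNat = rj + 1 from by omega]
      rw [show (((line ++ '\n' :: t).length : Int)).toNat = (line ++ '\n' :: t).length from by omega,
          show (((t.length : Nat) : Int)).toNat = t.length from by omega]
      rw [List.drop_length, List.drop_length]
      rw [List.take_append, List.take_of_length_le (by omega)]
      rw [show line.length + 1 + (rj + 1) - line.length = (rj + 1) + 1 from by omega]
      simp
    · have hfnl : ¬ PySem.Chars.find (t.drop mN) ['\n'] = -1 := by omega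
      rw [if_neg hfnl, if_neg hfnl]
      rw [if_neg (by omega), if_neg (by omega)]
      rw [PySem.List.slice_to _ (by omega), PySem.List.slice_to _ (by omega)]
      rw [PySem.List.slice_from _ (by omega), PySem.List.slice_from _ (by omega)]
      rw [show ((line.length : Int) + 1 + (rj : Int) + 1).toNat = line.length + 1 + (rj + 1) from by omega,
          show (((rj : Nat) : Int) + 1).toNat = rj + 1 from by omega]
      rw [show (((line.length + 1 + mN : Nat) : Int) + PySem.Chars.find (t.drop mN) ['\n']).toNat
            = line.length + 1 + (((mN : Nat) : Int) + PySem.Chars.find (t.drop mN) ['\n']).toNat from by omega]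
      rw [List.take_append, List.take_of_length_le (by omega)]
      rw [show line.length + 1 + (rj + 1) - line.length = (rj + 1) + 1 from by omega]
      rw [List.drop_append, List.drop_eq_nil_of_le (by omega)]
      rw [show line.length + 1 + (((mN : Nat) : Int) + PySem.Chars.find (t.drop mN) ['\n']).toNat - line.length
            = (((mN : Nat) : Int) + PySem.Chars.find (t.drop mN) ['\n']).toNat + 1 from by omega]
      simp


theorem pvMem_takeWhile_ne_nl {cs : List Char} : '\n' ∉ cs.takeWhile (fun c => c != '\n') := by
  intro hmem
  have := List.mem_takeWhile_imp hmem
  simp at this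

theorem pvDropWhile_head {p : Char → Bool} {cs t : List Char} {c : Char}
    (h : cs.dropWhile p = c :: t) : p c = false := by
  induction cs with
  | nil => simp at h
  | cons a u ih =>
    rw [List.dropWhile_cons] at h
    split at h
    · exact ih h
    · rename_i hpa
      injection h with h1 h2
      subst h1
      simpa using hpa

theorem pvSplit_decomp_nil {cs : List Char} (h : cs.dropWhile (fun c => c != '\n') = []) :
    pvSplit cs = [cs.takeWhile (fun c => c != '\n')] := by
  induction cs with
  | nil => simp [pvSplit]
  | cons c u ih =>
    rw [List.dropWhile_cons] at h
    by_cases hc : c = '\n'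
    · subst hc; simp at h
    · rw [if_pos (by simpa using hc)] at h
      simp only [pvSplit, if_neg hc, ih h]
      simp [pvConsHd, hc]

theorem pvSplit_decomp_cons {cs t : List Char} (h : cs.dropWhile (fun c => c != '\n') = '\n' :: t) :
    pvSplit cs = cs.takeWhile (fun c => c != '\n') :: pvSplit t := by
  induction cs with
  | nil => simp at h
  | cons c u ih =>
    rw [List.dropWhile_cons] at h
    by_cases hc : c = '\n'
    · subst hc
      rw [if_neg (by simp)] at h
      injection h with h1 h2
      subst h2
      simp [pvSplit]
    · rw [if_pos (by simpa using hc)] at h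
      simp only [pvSplit, if_neg hc, ih h]
      simp [pvConsHd, hc]

theorem pvUpdateLoopA_cons (new l : List Char) (rest : List (List Char)) :
    ∃ x xs, updateLoopA new (l :: rest) = x :: xs := by
  rw [updateLoopA]
  split
  · exact ⟨_, _, rfl⟩
  · exact ⟨_, _, rfl⟩

theorem pvMain (new : List Char) : ∀ (n : Nat) (cs : List Char), cs.length ≤ n →
    pvBcore new cs = PySem.Chars.join ['\n'] (updateLoopA new (pvSplit cs)) := by
  intro n
  induction n with
  | zero =>
    intro cs hcs
    have : cs = [] := List.length_eq_zero_iff.mp (Nat.le_zero.mp hcs)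
    subst this
    rw [pvBcore_noMatch new (by intro k hc; simpa [pvPat] using hc.length_le)]
    simp only [pvSplit, updateLoopA]
    rw [if_neg (by decide)]
    simp [PySem.Chars.join_singleton]
  | succ n ih =>
    intro cs hcs
    have hsplit := List.takeWhile_append_dropWhile (p := fun c => c != '\n') (l := cs)
    have hnl : '\n' ∉ cs.takeWhile (fun c => c != '\n') := pvMem_takeWhile_ne_nl
    cases hrest : cs.dropWhile (fun c => c != '\n') with
    | nil =>
      rw [hrest, List.append_nil] at hsplit
      rw [pvSplit_decomp_nil hrest, hsplit]
      by_cases hm : PySem.Chars.isIn pvPat cs = true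
      · have hlm := pvBcore_lineMatch (line := cs) (rest := []) new (hsplit ▸ hnl) hm (Or.inl rfl)
        rw [List.append_nil] at hlm
        rw [hlm]
        simp only [updateLoopA]
        rw [if_pos (by simpa [pvPat] using hm)]
        simp [PySem.Chars.join_singleton]
      · rw [pvBcore_noMatch new (by
          intro k hc
          exact hm (pvIsIn_iff_occ.mpr ⟨k, hc⟩))]
        simp only [updateLoopA]
        rw [if_neg (by simpa [pvPat] using hm)]
        simp [PySem.Chars.join_singleton]
    | cons c t =>
      have hc : c = '\n' := by
        have := pvDropWhile_head hrest
        simpa using this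
      subst hc
      have hcs2 : cs = cs.takeWhile (fun c => c != '\n') ++ '\n' :: t := by
        rw [hrest] at hsplit
        exact hsplit.symm
      have hlen : t.length ≤ n := by
        have := congrArg List.length hcs2
        simp at this
        omega
      rw [pvSplit_decomp_cons hrest]
      obtain ⟨x, xs, hx⟩ : ∃ x xs, pvSplit t = x :: xs := by
        cases h : pvSplit t with
        | nil => exact absurd h (pvSplit_ne_nil t)
        | cons x xs => exact ⟨x, xs, rfl⟩
      by_cases hm : PySem.Chars.isIn pvPat (cs.takeWhile (fun c => c != '\n')) = true
      · conv_lhs => rw [hcs2]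
        rw [pvBcore_lineMatch new hnl hm (Or.inr ⟨t, rfl⟩)]
        simp only [updateLoopA]
        rw [if_pos (by simpa [pvPat] using hm)]
        rw [hx, PySem.Chars.join_cons_cons, ← hx, pvJoin_pvSplit]
        simp
      · simp only [updateLoopA]
        rw [if_neg (by simpa [pvPat] using hm)]
        obtain ⟨y, ys, hy⟩ := pvUpdateLoopA_cons new x xs
        rw [hx, hy, PySem.Chars.join_cons_cons, ← hy, ← hx, ← ih t hlen]
        by_cases hocc : ∃ m, pvPat <+: t.drop m
        · conv_lhs => rw [hcs2]
          rw [pvBcore_shift new hnl (by simpa using hm) hocc]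
          simp
        · rw [pvBcore_noMatch new (cs := cs) (by
            intro k hk
            rw [hcs2] at hk
            rcases pvOccSplit hnl hk with ⟨_, hL⟩ | ⟨_, hR⟩
            · exact hm (pvIsIn_iff_occ.mpr ⟨k, hL⟩)
            · exact hocc ⟨_, hR⟩)]
          rw [pvBcore_noMatch new (cs := t) (by
            intro k hk
            exact hocc ⟨k, hk⟩)]
          conv_lhs => rw [hcs2]
          simp

-- B's port, rephrased through the proof-side copy pvBcore of its core
theorem pvAlt_eq (compose_content organization_name : String) :
    update_docker_compose_org_name_alt compose_content organization_name =
    if organization_name.toList ≠ [] ∧ PySem.Chars.strip organization_name.toList ≠ [] then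
      String.ofList (pvBcore ("          - ORG_NAME=".toList ++ PySem.Chars.strip organization_name.toList)
        compose_content.toList)
    else compose_content := by
  unfold update_docker_compose_org_name_alt pvBcore
  simp only [show "ORG_NAME=".toList = pvPat from rfl]
  by_cases hg : organization_name.toList ≠ [] ∧ PySem.Chars.strip organization_name.toList ≠ []
  · rw [if_pos hg, if_pos hg]
    by_cases hi : PySem.Chars.find compose_content.toList pvPat = -1
    · rw [if_pos hi, if_pos hi, String.ofList_toList]
    · rw [if_neg hi, if_neg hi]
  · rw [if_neg hg, if_neg hg]

-- ===== VERDICT (by name: the statement is the Claim_ definition above) =====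
theorem update_docker_compose_org_name_spec : Claim_equal_update_docker_compose_org_name := by
  intro compose_content organization_name _
  unfold Spec_update_docker_compose_org_name
  rw [pvAlt_eq]
  unfold update_docker_compose_org_name
  split
  · rw [pvSplitOn_eq]
    rw [← pvMain _ compose_content.toList.length compose_content.toList le_rfl]
  · rfl
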